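-- pv_equiv track=rewrite | github.com/levipshemish/jewgo-app | backend/routes/api_v4.py | _collect_sets_from_rows
-- ===== SOURCE A (Python) =====
-- def _collect_sets_from_rows(rows):
--     agencies, kosher_categories, listing_types, price_ranges, cities, states = (
--         set(),
--         set(),
--         set(),
--         set(),
--         set(),
--         set(),
--     )
--     for row in rows:
--         if row[0]:
--             agencies.add(row[0])
--         if row[1]:
--             kosher_categories.add(row[1])
--         if row[2]:
--             listing_types.add(row[2])
--         if row[3]:
--             price_ranges.add(row[3])
--         if row[4]:
--             cities.add(row[4])
--         if row[5]:
--             states.add(row[5])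
--     return agencies, kosher_categories, listing_types, price_ranges, cities, states
-- ===== SOURCE B (Python) =====
-- def _collect_sets_from_rows(rows):
--     rows = list(rows)
--     return tuple({row[i] for row in rows if row[i]} for i in range(6))
-- ===== Notes on version B (the rewrite author's own statement) =====
-- stated objective: simpler
-- what changed: Replaces the row-major pass that updates six set accumulators with a one-line tuple of six column-wise set comprehensions (rows materialized once to support iterators).
import Mathlib
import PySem

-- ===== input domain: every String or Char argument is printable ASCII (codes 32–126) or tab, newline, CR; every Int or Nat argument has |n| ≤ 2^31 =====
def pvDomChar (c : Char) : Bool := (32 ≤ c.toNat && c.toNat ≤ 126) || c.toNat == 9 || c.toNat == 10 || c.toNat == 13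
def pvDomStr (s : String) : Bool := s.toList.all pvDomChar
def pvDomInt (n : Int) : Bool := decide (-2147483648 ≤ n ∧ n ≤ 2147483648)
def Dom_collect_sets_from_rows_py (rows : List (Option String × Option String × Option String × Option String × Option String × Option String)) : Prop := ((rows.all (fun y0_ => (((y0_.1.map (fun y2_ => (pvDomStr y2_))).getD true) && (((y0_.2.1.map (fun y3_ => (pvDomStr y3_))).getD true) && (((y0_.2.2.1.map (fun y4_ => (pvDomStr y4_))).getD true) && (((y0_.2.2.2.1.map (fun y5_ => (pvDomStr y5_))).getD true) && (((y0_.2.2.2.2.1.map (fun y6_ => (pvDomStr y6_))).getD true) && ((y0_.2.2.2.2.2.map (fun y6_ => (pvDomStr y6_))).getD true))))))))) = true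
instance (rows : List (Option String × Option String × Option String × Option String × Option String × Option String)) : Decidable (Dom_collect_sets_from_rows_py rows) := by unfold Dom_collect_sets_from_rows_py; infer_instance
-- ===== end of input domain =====

-- B replaces A's single row-major pass with six independent column-wise set comprehensions (simpler decomposition; rows materialized to a list first); return values proved equal on all inputs.


-- ===== PORT A =====
-- A: one row-major pass, conditionally adding each truthy column value to its set.
def collect_sets_from_rows_py (rows : List (Option String × Option String × Option String × Option String × Option String × Option String)) : List String × List String × List String × List String × List String × List String :=
  rows.foldl (fun acc row =>
    let a := match row.1 with | some s => if s ≠ "" then PySem.Set.add acc.1 s else acc.1 | none => acc.1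
    let b := match row.2.1 with | some s => if s ≠ "" then PySem.Set.add acc.2.1 s else acc.2.1 | none => acc.2.1
    let c := match row.2.2.1 with | some s => if s ≠ "" then PySem.Set.add acc.2.2.1 s else acc.2.2.1 | none => acc.2.2.1
    let d := match row.2.2.2.1 with | some s => if s ≠ "" then PySem.Set.add acc.2.2.2.1 s else acc.2.2.2.1 | none => acc.2.2.2.1
    let e := match row.2.2.2.2.1 with | some s => if s ≠ "" then PySem.Set.add acc.2.2.2.2.1 s else acc.2.2.2.2.1 | none => acc.2.2.2.2.1
    let f := match row.2.2.2.2.2 with | some s => if s ≠ "" then PySem.Set.add acc.2.2.2.2.2 s else acc.2.2.2.2.2 | none => acc.2.2.2.2.2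
    (a, b, c, d, e, f))
    (PySem.Set.empty, PySem.Set.empty, PySem.Set.empty, PySem.Set.empty, PySem.Set.empty, PySem.Set.empty)

-- ===== PORT B =====
-- B: truthy values of one column, in row order ({row[i] for row in rows if row[i]})
def pvColSet (xs : List (Option String)) : List String :=
  PySem.Set.ofList (xs.filterMap (fun o => o.bind (fun s => if s ≠ "" then some s else none)))

def collect_sets_from_rows_py_alt (rows : List (Option String × Option String × Option String × Option String × Option String × Option String)) : List String × List String × List String × List String × List String × List String :=
  (pvColSet (rows.map (·.1)), pvColSet (rows.map (·.2.1)), pvColSet (rows.map (·.2.2.1)),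
   pvColSet (rows.map (·.2.2.2.1)), pvColSet (rows.map (·.2.2.2.2.1)), pvColSet (rows.map (·.2.2.2.2.2)))

-- ===== PRECONDITION & SPEC =====
def Spec_collect_sets_from_rows_py (rows : List (Option String × Option String × Option String × Option String × Option String × Option String)) (out : List String × List String × List String × List String × List String × List String) : Prop := out = collect_sets_from_rows_py_alt rows
instance (rows : List (Option String × Option String × Option String × Option String × Option String × Option String)) (out : List String × List String × List String × List String × List String × List String) : Decidable (Spec_collect_sets_from_rows_py rows out) := by unfold Spec_collect_sets_from_rows_py; infer_instance

-- ===== CLAIM (what is proved, stated in full; the proofs are below) =====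
def Claim_equal_collect_sets_from_rows_py : Prop := ∀ (rows : List (Option String × Option String × Option String × Option String × Option String × Option String)), Dom_collect_sets_from_rows_py rows → Spec_collect_sets_from_rows_py rows (collect_sets_from_rows_py rows)

-- ===== LEMMAS AND PROOFS =====

-- the truthy filter of one cell
def pvTv (o : Option String) : Option String := o.bind (fun s => if s ≠ "" then some s else none)

-- one cell of A's step: adding a truthy value first equals consing its filtered value
theorem pv_cell (o : Option String) (init : List String) (l : List (Option String)) :
    List.foldl PySem.Set.add
      (match o with | some s => if s ≠ "" then PySem.Set.add init s else init | none => init)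
      (List.filterMap pvTv l)
    = List.foldl PySem.Set.add init (List.filterMap pvTv (o :: l)) := by
  cases o with
  | none => rfl
  | some s =>
    by_cases h : s = "" <;> simp [pvTv, h]

-- A's combined fold decomposes into six independent column folds
theorem pv_fold_cols (rows : List (Option String × Option String × Option String × Option String × Option String × Option String))
    (a b c d e f : List String) :
    rows.foldl (fun acc row =>
      let a := match row.1 with | some s => if s ≠ "" then PySem.Set.add acc.1 s else acc.1 | none => acc.1
      let b := match row.2.1 with | some s => if s ≠ "" then PySem.Set.add acc.2.1 s else acc.2.1 | none => acc.2.1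
      let c := match row.2.2.1 with | some s => if s ≠ "" then PySem.Set.add acc.2.2.1 s else acc.2.2.1 | none => acc.2.2.1
      let d := match row.2.2.2.1 with | some s => if s ≠ "" then PySem.Set.add acc.2.2.2.1 s else acc.2.2.2.1 | none => acc.2.2.2.1
      let e := match row.2.2.2.2.1 with | some s => if s ≠ "" then PySem.Set.add acc.2.2.2.2.1 s else acc.2.2.2.2.1 | none => acc.2.2.2.2.1
      let f := match row.2.2.2.2.2 with | some s => if s ≠ "" then PySem.Set.add acc.2.2.2.2.2 s else acc.2.2.2.2.2 | none => acc.2.2.2.2.2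
      (a, b, c, d, e, f)) (a, b, c, d, e, f) =
    (((rows.map (·.1)).filterMap pvTv).foldl PySem.Set.add a,
     ((rows.map (·.2.1)).filterMap pvTv).foldl PySem.Set.add b,
     ((rows.map (·.2.2.1)).filterMap pvTv).foldl PySem.Set.add c,
     ((rows.map (·.2.2.2.1)).filterMap pvTv).foldl PySem.Set.add d,
     ((rows.map (·.2.2.2.2.1)).filterMap pvTv).foldl PySem.Set.add e,
     ((rows.map (·.2.2.2.2.2)).filterMap pvTv).foldl PySem.Set.add f) := by
  induction rows generalizing a b c d e f with
  | nil => rfl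
  | cons r rs ih =>
    obtain ⟨o1, o2, o3, o4, o5, o6⟩ := r
    simp only [List.foldl_cons]
    rw [ih]
    simp only [List.map_cons]
    rw [pv_cell, pv_cell, pv_cell, pv_cell, pv_cell, pv_cell]

-- each column fold from [] is exactly Set.ofList of the filterMap
theorem pv_colSet_eq (xs : List (Option String)) :
    (xs.filterMap pvTv).foldl PySem.Set.add [] = pvColSet xs := by
  simp [pvColSet, PySem.Set.ofList_eq_foldl, pvTv]

-- ===== VERDICT (by name: the statement is the Claim_ definition above) =====
theorem collect_sets_from_rows_py_spec : Claim_equal_collect_sets_from_rows_py := by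
  intro rows _
  show collect_sets_from_rows_py rows = collect_sets_from_rows_py_alt rows
  unfold collect_sets_from_rows_py collect_sets_from_rows_py_alt
  rw [show (PySem.Set.empty : List String) = [] from rfl]
  rw [pv_fold_cols]
  rw [pv_colSet_eq, pv_colSet_eq, pv_colSet_eq, pv_colSet_eq, pv_colSet_eq, pv_colSet_eq]
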